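-- pv_equiv track=rewrite | github.com/AntiSomnus/sniffer | main.py | packet_align
-- ===== SOURCE A (Python) =====
-- def packet_align(s):
--     """Convert hex string to Wireshark-type raw hex string.
--
--     Args:
--         s: hex string of a packet
--
--     Returns:
--         string:Wireshark-type raw hex string
--     """
--     s = [s[i:i + 32] for i in range(0, len(s), 32)]
--     for n in range(len(s)):
--         s[n] = [s[n][i:i + 2] for i in range(0, len(s[n]), 2)]
--         s[n].append("\n")
--         s[n].insert(0, format(n * 16, "04x"))
--         s[n] = " ".join(s[n])
--     return s
-- ===== SOURCE B (Python) =====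
-- def packet_align(s):
--     """Convert hex string to Wireshark-type raw hex string.
--
--     Stream decomposition: consume the string destructively 32 chars (one row)
--     at a time, and build each row by string concatenation in an inner while
--     loop that peels off 2 chars per step -- no index ranges, no join().
--     """
--     out = []
--     off = 0
--     while s:
--         chunk, s = s[:32], s[32:]
--         row = format(off, "04x")
--         while chunk:
--             row += " " + chunk[:2]
--             chunk = chunk[2:]
--         out.append(row + " \n")
--         off += 16
--     return out
-- ===== Notes on version B (the rewrite author's own statement) =====
-- stated objective: alternative
-- what changed: A builds rows via index-range list comprehensions (chunk into 32-char slices, re-split each into pairs, insert offset, join); B consumes the string destructively with nested while loops, peeling 32 chars per row and 2 chars per byte, building each row by plain string concatenation with a running offset counter -- no ranges, no list mutation, no join.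
import Mathlib
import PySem

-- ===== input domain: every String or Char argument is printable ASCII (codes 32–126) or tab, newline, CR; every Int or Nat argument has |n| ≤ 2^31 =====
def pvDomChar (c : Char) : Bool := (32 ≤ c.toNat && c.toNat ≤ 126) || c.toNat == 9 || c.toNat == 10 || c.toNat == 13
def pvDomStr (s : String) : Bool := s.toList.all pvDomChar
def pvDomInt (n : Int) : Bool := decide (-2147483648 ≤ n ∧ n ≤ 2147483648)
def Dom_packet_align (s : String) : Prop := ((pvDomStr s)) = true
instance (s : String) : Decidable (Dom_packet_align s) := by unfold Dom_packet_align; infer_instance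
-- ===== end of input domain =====

-- B consumes the string destructively with nested while loops (32 chars per row, 2 per byte),
-- building each row by concatenation; A builds rows via index-range comprehensions and join
-- (alternative decomposition, same cost).

-- format(n, "04x") for n ≥ 0 (Python's zero-padded lowercase hex) — a builtin both programs call
def fmt04x (n : Int) : List Char :=
  let ds := Nat.toDigits 16 n.toNat
  List.replicate (4 - ds.length) '0' ++ ds

-- ===== PORT A =====
def packet_align (s : String) : List String :=
  let l := s.toList
  -- s = [s[i:i+32] for i in range(0, len(s), 32)]
  let chunks := (PySem.List.pyRange 0 (PySem.List.len l) 32).map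
    (fun i => PySem.List.slice l (some i) (some (i + 32)))
  -- for n in range(len(s)): s[n] = " ".join([pairs of s[n]] + ["\n"] with offset inserted at 0)
  (PySem.List.pyRange 0 (PySem.List.len chunks) 1).map (fun n =>
    let c := PySem.List.pyGetD chunks n []
    let row := (PySem.List.pyRange 0 (PySem.List.len c) 2).map
      (fun i => PySem.List.slice c (some i) (some (i + 2)))
    let row := row ++ [['\n']]
    let row := PySem.List.insert row 0 (fmt04x (n * 16))
    String.ofList (PySem.Chars.join [' '] row))

-- ===== PORT B =====
-- inner while loop: while chunk: row += " " + chunk[:2]; chunk = chunk[2:]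
def pvRowLoop (chunk row : List Char) : List Char :=
  if chunk = [] then row
  else pvRowLoop (chunk.drop 2) (row ++ ' ' :: chunk.take 2)
termination_by chunk.length
decreasing_by cases chunk with
  | nil => simp_all
  | cons a t => simp

-- outer while loop: while s: chunk, s = s[:32], s[32:]; … ; out.append(row + " \n"); off += 16
def pvMainLoop (s : List Char) (off : Int) (out : List String) : List String :=
  if s = [] then out
  else pvMainLoop (s.drop 32)
    (off + 16)
    (out ++ [String.ofList (pvRowLoop (s.take 32) (fmt04x off) ++ [' ', '\n'])])
termination_by s.length
decreasing_by cases s with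
  | nil => simp_all
  | cons a t => simp

def packet_align_alt (s : String) : List String :=
  pvMainLoop s.toList 0 []

-- ===== PRECONDITION & SPEC =====
def Spec_packet_align (s : String) (out : List String) : Prop := out = packet_align_alt s
instance (s : String) (out : List String) : Decidable (Spec_packet_align s out) := by unfold Spec_packet_align; infer_instance

-- ===== CLAIM (what is proved, stated in full; the proofs are below) =====
def Claim_equal_packet_align : Prop := ∀ (s : String), Dom_packet_align s → Spec_packet_align s (packet_align s)

-- ===== LEMMAS AND PROOFS =====

-- number of byte pairs in row k (they start at char 32*k; at most 16 pairs)
def rcnt (l : List Char) (k : Nat) : Nat := (min 32 (l.length - 32 * k) + 1) / 2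

-- the common normal form of row k
def rowOf (l : List Char) (k : Nat) : String :=
  String.ofList (fmt04x ((k : Int) * 16) ++ [' '] ++
    PySem.Chars.join [' ']
      (((List.range (rcnt l k)).map (fun i => ((l.drop (32 * k + 2 * i)).take 2))) ++ [['\n']]))

lemma join_cons_of_ne_nil (sep x : List Char) (ys : List (List Char)) (h : ys ≠ []) :
    PySem.Chars.join sep (x :: ys) = x ++ sep ++ PySem.Chars.join sep ys := by
  cases ys with
  | nil => exact absurd rfl h
  | cons q t => exact PySem.Chars.join_cons_cons sep x q t

lemma pyRange_step (L k : Nat) (hk : 0 < k) :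
    PySem.List.pyRange 0 (L : Int) k = (List.range ((L + k - 1) / k)).map (fun j => ((k * j : Nat) : Int)) := by
  rw [PySem.List.pyRange_of_pos 0 (L : Int) (by exact_mod_cast hk)]
  have hn' : (if (0 : Int) < (L : Int) then (((L : Int) - 0 + k - 1) / k).toNat else 0) = (L + k - 1) / k := by
    split_ifs with h
    · have : ((L : Int) - 0 + k - 1) = ((L + k - 1 : Nat) : Int) := by omega
      rw [this, ← Int.natCast_div, Int.toNat_natCast]
    · have hL : L = 0 := by omega
      subst hL
      exact (Nat.div_eq_of_lt (by omega)).symm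
  rw [hn']
  apply List.map_congr_left
  intro j _
  push_cast
  ring

lemma pyRange32 (L : Nat) :
    PySem.List.pyRange 0 (L : Int) 32 = (List.range ((L + 31) / 32)).map (fun j => ((32 * j : Nat) : Int)) := by
  have h := pyRange_step L 32 (by omega)
  simpa using h

lemma pyRange2 (L : Nat) :
    PySem.List.pyRange 0 (L : Int) 2 = (List.range ((L + 1) / 2)).map (fun j => ((2 * j : Nat) : Int)) := by
  have h := pyRange_step L 2 (by omega)
  simpa using h

lemma A_norm (s : String) :
    packet_align s = (List.range ((s.toList.length + 31) / 32)).map (rowOf s.toList) := by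
  unfold packet_align
  set l := s.toList with hl
  simp only [PySem.List.len_eq]
  have hchunks : (PySem.List.pyRange 0 (l.length : Int) 32).map
      (fun i => PySem.List.slice l (some i) (some (i + 32)))
      = (List.range ((l.length + 31) / 32)).map (fun j => (l.drop (32 * j)).take 32) := by
    rw [pyRange32, List.map_map]
    apply List.map_congr_left
    intro j _
    simpa using PySem.List.slice_natCast_add l (32 * j) 32
  rw [hchunks]
  set N := (l.length + 31) / 32 with hN
  rw [List.length_map, List.length_range, PySem.List.pyRange_one, List.map_map]
  simp only [Int.sub_zero, Int.toNat_natCast]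
  apply List.map_congr_left
  intro k hk
  rw [List.mem_range] at hk
  have hc : PySem.List.pyGetD ((List.range N).map (fun j => (l.drop (32 * j)).take 32)) ((0:Int) + (k:Int)) []
      = (l.drop (32 * k)).take 32 := by
    rw [zero_add, PySem.List.pyGetD_natCast]
    simp [List.getD_eq_getElem?_getD, List.getElem?_range hk]
  simp only [Function.comp, hc]
  have hlen : ((l.drop (32 * k)).take 32).length = min 32 (l.length - 32 * k) := by
    simp
  rw [hlen]
  have hrc : (min 32 (l.length - 32 * k) + 1) / 2 = rcnt l k := rfl
  have hpairs : (PySem.List.pyRange 0 ((min 32 (l.length - 32 * k) : Nat) : Int) 2).map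
      (fun i => PySem.List.slice ((l.drop (32 * k)).take 32) (some i) (some (i + 2)))
      = (List.range (rcnt l k)).map (fun i => (l.drop (32 * k + 2 * i)).take 2) := by
    rw [pyRange2, List.map_map, hrc]
    apply List.map_congr_left
    intro i hi
    rw [List.mem_range] at hi
    have hi16 : i < 16 := lt_of_lt_of_le hi (by unfold rcnt; omega)
    have h1 : PySem.List.slice ((l.drop (32 * k)).take 32) (some ((2 * i : Nat) : Int)) (some (((2 * i : Nat) : Int) + 2))
        = (((l.drop (32 * k)).take 32).drop (2 * i)).take 2 := by
      simpa using PySem.List.slice_natCast_add ((l.drop (32 * k)).take 32) (2 * i) 2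
    rw [Function.comp_apply] at *
    rw [h1, List.drop_take, List.take_take, List.drop_drop]
    have : min 2 (32 - 2 * i) = 2 := by omega
    rw [this]
  rw [hpairs, PySem.List.insert_zero,
      join_cons_of_ne_nil [' '] _ _ (by simp)]
  unfold rowOf
  ring_nf

-- unroll of the inner while loop: the row accumulator gets " "+pair for each byte pair of chunk
lemma rowLoop_eq (c row : List Char) :
    pvRowLoop c row
      = row ++ (((List.range ((c.length + 1) / 2)).map
          (fun i => ' ' :: (c.drop (2 * i)).take 2)).flatten) := by
  generalize hn : c.length = n
  induction n using Nat.strong_induction_on generalizing c row with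
  | _ n ih =>
    by_cases hc : c = []
    · subst hc
      obtain rfl : n = 0 := by simpa using hn.symm
      rw [pvRowLoop]
      simp
    · rw [pvRowLoop, if_neg hc]
      have hcl : 0 < c.length := List.length_pos_iff.mpr hc
      have hdl : (c.drop 2).length = c.length - 2 := by simp
      rw [ih (c.drop 2).length (by omega) _ _ rfl]
      have hsplit : (n + 1) / 2 = ((c.drop 2).length + 1) / 2 + 1 := by omega
      rw [hsplit, List.range_succ_eq_map, List.map_cons, List.flatten_cons]
      simp only [List.map_map, List.append_assoc, List.cons_append]
      congr 2
      congr 1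
      apply congrArg List.flatten
      apply List.map_congr_left
      intro i _
      simp only [Function.comp_apply, List.drop_drop, Nat.succ_eq_add_one]
      rw [show 2 + 2 * i = 2 * (i + 1) from by ring]

-- unroll of the outer while loop
lemma mainLoop_eq (l : List Char) (off : Int) (out : List String) :
    pvMainLoop l off out
      = out ++ (List.range ((l.length + 31) / 32)).map
          (fun j => String.ofList
            (pvRowLoop ((l.drop (32 * j)).take 32) (fmt04x (off + 16 * j)) ++ [' ', '\n'])) := by
  generalize hn : l.length = n
  induction n using Nat.strong_induction_on generalizing l off out with
  | _ n ih =>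
    by_cases hl : l = []
    · subst hl
      obtain rfl : n = 0 := by simpa using hn.symm
      rw [pvMainLoop]
      simp
    · rw [pvMainLoop, if_neg hl]
      have hcl : 0 < l.length := List.length_pos_iff.mpr hl
      have hdl : (l.drop 32).length = l.length - 32 := by simp
      rw [ih (l.drop 32).length (by omega) _ _ _ rfl]
      have hsplit : (n + 31) / 32 = ((l.drop 32).length + 31) / 32 + 1 := by omega
      rw [hsplit, List.range_succ_eq_map, List.map_cons]
      rw [List.append_assoc, List.singleton_append]
      congr 2
      · simp
      · rw [List.map_map]
        apply List.map_congr_left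
        intro j _
        simp only [Function.comp_apply, List.drop_drop, Nat.succ_eq_add_one]
        have h1 : off + 16 + 16 * (j : Int) = off + 16 * ((j : Int) + 1) := by ring
        push_cast
        rw [h1, show 32 + 32 * j = 32 * (j + 1) from by ring]

-- " " + " ".join(pairs + ["\n"]) = concat of (" "+pair) then " \n"
lemma join_aux (ps : List (List Char)) :
    ' ' :: PySem.Chars.join [' '] (ps ++ [['\n']])
      = ((ps.map (fun p => ' ' :: p)).flatten) ++ [' ', '\n'] := by
  induction ps with
  | nil => simp [PySem.Chars.join_singleton]
  | cons p t ih =>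
    rw [List.cons_append, join_cons_of_ne_nil [' '] p (t ++ [['\n']]) (by simp)]
    simp only [List.map_cons, List.flatten_cons, List.append_assoc]
    rw [← ih]
    simp

lemma B_norm (s : String) :
    packet_align_alt s = (List.range ((s.toList.length + 31) / 32)).map (rowOf s.toList) := by
  unfold packet_align_alt
  set l := s.toList with hl
  rw [mainLoop_eq, List.nil_append]
  apply List.map_congr_left
  intro k hk
  rw [List.mem_range] at hk
  rw [rowLoop_eq]
  have hlen : ((l.drop (32 * k)).take 32).length = min 32 (l.length - 32 * k) := by simp
  rw [hlen]
  have hrc : (min 32 (l.length - 32 * k) + 1) / 2 = rcnt l k := rfl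
  rw [hrc]
  unfold rowOf
  have hpair : (List.range (rcnt l k)).map
      (fun i => ' ' :: ((((l.drop (32 * k)).take 32).drop (2 * i)).take 2))
      = (List.range (rcnt l k)).map (fun i => ' ' :: (l.drop (32 * k + 2 * i)).take 2) := by
    apply List.map_congr_left
    intro i hi
    rw [List.mem_range] at hi
    have hi16 : i < 16 := lt_of_lt_of_le hi (by unfold rcnt; omega)
    congr 1
    rw [List.drop_take, List.take_take, List.drop_drop]
    have : min 2 (32 - 2 * i) = 2 := by omega
    rw [this]
  rw [hpair]
  have hjoin := join_aux ((List.range (rcnt l k)).map (fun i => (l.drop (32 * k + 2 * i)).take 2))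
  simp only [List.map_map, Function.comp_def] at hjoin
  rw [List.append_assoc, ← hjoin]
  have hoff : (0 : Int) + 16 * (k : Int) = (k : Int) * 16 := by ring
  rw [hoff]
  simp

-- ===== VERDICT (by name: the statement is the Claim_ definition above) =====
theorem packet_align_spec : Claim_equal_packet_align := by
  intro s _
  unfold Spec_packet_align
  rw [A_norm, B_norm]
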